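-- pv_equiv track=rewrite | github.com/ivan1016017/LeetCodeAlgorithmProblems | src/my_project/medium_problems/from1to50/find_valid_matrix_given_row_column_sums.py | restoreMatrix
-- ===== SOURCE A (Python) =====
-- from typing import List
--
-- def restoreMatrix(rowSum: List[int], colSum: List[int]) -> List[List[int]]:
--
--     # initialize variables
--     m = len(rowSum)
--     n = len(colSum)
--     solution = [[0 for y in range(n)] for x in range(m)]
--
--     def fill_values(rows,cols):
--         if rows == m or cols == n:
--             return
--
--
--         solution[rows][cols] = min(rowSum[rows], colSum[cols])
--
--         if solution[rows][cols] == rowSum[rows]: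
--             colSum[cols] -= rowSum[rows]
--             fill_values(rows +1, cols)
--         else:
--             rowSum[rows] -= colSum[cols]
--             fill_values(rows, cols+1)
--
--     fill_values(0,0)
--
--
--
--     return solution
-- ===== SOURCE B (Python) =====
-- from typing import List
--
-- def restoreMatrix(rowSum: List[int], colSum: List[int]) -> List[List[int]]:
--     # Iterative two-pointer staircase walk collecting the nonzero cells in a dict,
--     # then materializing the matrix once at the end (A recurses and mutates a
--     # preallocated matrix). Performs the same in-place decrements on rowSum/colSum as A.
--     m, n = len(rowSum), len(colSum)
--     cells = {}
--     i = j = 0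
--     while i < m and j < n:
--         v = min(rowSum[i], colSum[j])
--         cells[i, j] = v
--         if v == rowSum[i]:
--             colSum[j] -= rowSum[i]
--             i += 1
--         else:
--             rowSum[i] -= colSum[j]
--             j += 1
--     return [[cells.get((x, y), 0) for y in range(n)] for x in range(m)]
-- ===== Notes on version B (the rewrite author's own statement) =====
-- stated objective: alternative
-- what changed: Replaces A's recursive fill of a preallocated matrix with an iterative two-pointer staircase walk that records only the visited cells in a dict and builds the matrix once at the end (also avoids Python's recursion-depth limit).
import Mathlib
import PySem

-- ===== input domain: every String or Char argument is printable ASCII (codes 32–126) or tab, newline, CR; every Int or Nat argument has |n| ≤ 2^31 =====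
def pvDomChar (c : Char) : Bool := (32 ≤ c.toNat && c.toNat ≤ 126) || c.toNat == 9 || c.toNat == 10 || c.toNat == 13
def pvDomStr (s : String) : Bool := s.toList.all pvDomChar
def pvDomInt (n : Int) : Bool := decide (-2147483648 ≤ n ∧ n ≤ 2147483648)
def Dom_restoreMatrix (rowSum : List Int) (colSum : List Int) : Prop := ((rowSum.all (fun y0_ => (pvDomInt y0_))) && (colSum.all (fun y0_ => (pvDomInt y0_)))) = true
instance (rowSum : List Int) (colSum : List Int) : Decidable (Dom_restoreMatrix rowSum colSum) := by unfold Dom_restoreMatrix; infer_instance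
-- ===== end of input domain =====

-- B replaces A's recursive fill of a preallocated matrix by an iterative two-pointer walk
-- collecting the visited cells in a dict, materializing the matrix once at the end
-- (same in-place decrements of rowSum/colSum as A; the equivalence proved is about the return value).


-- ===== PORT A =====
-- fill_values: recursion modelled with fuel (Python's recursion is finite; fuel m+n+1 is
-- an upper bound on the recursion depth, so the 0-fuel branch is never reached).
-- Indexing uses getD: in Python all accesses are in range (rows < m = len(rowSum), cols < n).
def fillA (m n : Nat) (fuel : Nat) (sol : List (List Int)) (rowS colS : List Int)
    (rows cols : Nat) : List (List Int) × List Int × List Int :=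
  match fuel with
  | 0 => (sol, rowS, colS)
  | fuel + 1 =>
    if rows = m ∨ cols = n then (sol, rowS, colS)
    else
      let v := min (rowS.getD rows 0) (colS.getD cols 0)
      let sol' := sol.set rows ((sol.getD rows []).set cols v)
      if v = rowS.getD rows 0 then
        fillA m n fuel sol' rowS (colS.set cols (colS.getD cols 0 - rowS.getD rows 0)) (rows + 1) cols
      else
        fillA m n fuel sol' (rowS.set rows (rowS.getD rows 0 - colS.getD cols 0)) colS rows (cols + 1)

def restoreMatrix (rowSum : List Int) (colSum : List Int) : List (List Int) :=
  let m := rowSum.length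
  let n := colSum.length
  let solution := (List.range m).map (fun _ => (List.range n).map (fun _ => (0 : Int)))
  (fillA m n (m + n + 1) solution rowSum colSum 0 0).1

-- ===== PORT B =====
-- The while loop, modelled with the same fuel bound m+n+1 (each iteration increments i or j,
-- so the loop runs at most m+n times; the 0-fuel branch is never reached).
def loopB (m n : Nat) (fuel : Nat) (rowS colS : List Int) (i j : Nat)
    (cells : PySem.Dict (Nat × Nat) Int) : PySem.Dict (Nat × Nat) Int :=
  match fuel with
  | 0 => cells
  | fuel + 1 =>
    if i < m ∧ j < n then
      let v := min (rowS.getD i 0) (colS.getD j 0)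
      let cells' := cells.insert (i, j) v
      if v = rowS.getD i 0 then
        loopB m n fuel rowS (colS.set j (colS.getD j 0 - rowS.getD i 0)) (i + 1) j cells'
      else
        loopB m n fuel (rowS.set i (rowS.getD i 0 - colS.getD j 0)) colS i (j + 1) cells'
    else cells

def restoreMatrix_alt (rowSum : List Int) (colSum : List Int) : List (List Int) :=
  let m := rowSum.length
  let n := colSum.length
  let cells := loopB m n (m + n + 1) rowSum colSum 0 0 PySem.Dict.empty
  (List.range m).map (fun x => (List.range n).map (fun y => cells.getD (x, y) 0))

-- ===== PRECONDITION & SPEC =====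
def Spec_restoreMatrix (rowSum : List Int) (colSum : List Int) (out : List (List Int)) : Prop := out = restoreMatrix_alt rowSum colSum
instance (rowSum : List Int) (colSum : List Int) (out : List (List Int)) : Decidable (Spec_restoreMatrix rowSum colSum out) := by unfold Spec_restoreMatrix; infer_instance

-- ===== CLAIM (what is proved, stated in full; the proofs are below) =====
def Claim_equal_restoreMatrix : Prop := ∀ (rowSum : List Int) (colSum : List Int), Dom_restoreMatrix rowSum colSum → Spec_restoreMatrix rowSum colSum (restoreMatrix rowSum colSum)

-- ===== LEMMAS AND PROOFS =====

-- the common "staircase walk": the list of (coordinate, value) cells both programs touch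
def walk (m n : Nat) (fuel : Nat) (rowS colS : List Int) (i j : Nat) : List ((Nat × Nat) × Int) :=
  match fuel with
  | 0 => []
  | fuel + 1 =>
    if i < m ∧ j < n then
      if min (rowS.getD i 0) (colS.getD j 0) = rowS.getD i 0 then
        ((i, j), min (rowS.getD i 0) (colS.getD j 0))
          :: walk m n fuel rowS (colS.set j (colS.getD j 0 - rowS.getD i 0)) (i + 1) j
      else
        ((i, j), min (rowS.getD i 0) (colS.getD j 0))
          :: walk m n fuel (rowS.set i (rowS.getD i 0 - colS.getD j 0)) colS i (j + 1)
    else []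

def cellGet (sol : List (List Int)) (x y : Nat) : Int := (sol.getD x []).getD y 0

def setCell (sol : List (List Int)) (a b : Nat) (v : Int) : List (List Int) :=
  sol.set a ((sol.getD a []).set b v)

def applyCells (sol : List (List Int)) (ws : List ((Nat × Nat) × Int)) : List (List Int) :=
  ws.foldl (fun s p => setCell s p.1.1 p.1.2 p.2) sol

theorem walk_mem (m n fuel : Nat) (rowS colS : List Int) (i j : Nat) :
    ∀ p ∈ walk m n fuel rowS colS i j,
      i ≤ p.1.1 ∧ p.1.1 < m ∧ j ≤ p.1.2 ∧ p.1.2 < n ∧ i + j ≤ p.1.1 + p.1.2 := by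
  induction fuel generalizing rowS colS i j with
  | zero => simp [walk]
  | succ fuel ih =>
    intro p hp
    unfold walk at hp
    by_cases h : i < m ∧ j < n
    · rw [if_pos h] at hp
      split at hp <;> rw [List.mem_cons] at hp <;> rcases hp with rfl | hp <;>
        first
        | exact ⟨le_refl _, h.1, le_refl _, h.2, le_refl _⟩
        | (have := ih _ _ _ _ _ hp; omega)
    · rw [if_neg h] at hp; simp at hp

theorem walk_pairwise (m n fuel : Nat) (rowS colS : List Int) (i j : Nat) :
    (walk m n fuel rowS colS i j).Pairwise (fun a b => a.1 ≠ b.1) := by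
  induction fuel generalizing rowS colS i j with
  | zero => simp [walk]
  | succ fuel ih =>
    unfold walk
    by_cases h : i < m ∧ j < n
    · rw [if_pos h]
      split <;>
      · refine List.Pairwise.cons (fun q hq => ?_) (ih _ _ _ _)
        have := walk_mem _ _ _ _ _ _ _ q hq
        intro he
        rw [← he] at this
        dsimp only at this
        omega
    · rw [if_neg h]; exact List.Pairwise.nil

-- A's fill equals applying the walk's cells to the matrix (conditions coincide given i ≤ m, j ≤ n)
theorem fillA_eq_applyCells (m n fuel : Nat) (sol : List (List Int)) (rowS colS : List Int)
    (i j : Nat) (hi : i ≤ m) (hj : j ≤ n) :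
    (fillA m n fuel sol rowS colS i j).1 = applyCells sol (walk m n fuel rowS colS i j) := by
  induction fuel generalizing sol rowS colS i j with
  | zero => simp [fillA, walk, applyCells]
  | succ fuel ih =>
    unfold fillA walk
    by_cases h : i < m ∧ j < n
    · have hne : ¬ (i = m ∨ j = n) := by omega
      rw [if_pos h, if_neg hne]
      dsimp only
      split
      · rw [ih _ _ _ _ _ (by omega) hj]; rfl
      · rw [ih _ _ _ _ _ hi (by omega)]; rfl
    · have he : i = m ∨ j = n := by omega
      rw [if_pos he, if_neg h]; rfl

-- B's loop appends the walk's cells to the dict (all its keys are fresh)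
theorem loopB_eq_walk (m n fuel : Nat) (rowS colS : List Int) (i j : Nat)
    (cells : PySem.Dict (Nat × Nat) Int)
    (hc : ∀ k ∈ cells.keys, k.1 + k.2 < i + j) :
    (loopB m n fuel rowS colS i j cells).items = cells.items ++ walk m n fuel rowS colS i j := by
  induction fuel generalizing rowS colS i j cells with
  | zero => simp [loopB, walk]
  | succ fuel ih =>
    unfold loopB walk
    by_cases h : i < m ∧ j < n
    · rw [if_pos h, if_pos h]
      dsimp only
      have hfresh : cells.contains (i, j) = false := by
        cases hcc : cells.contains (i, j)
        · rfl
        · exfalso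
          have hmem : (i, j) ∈ cells.keys := (PySem.Dict.contains_iff_mem_keys _ _).1 hcc
          have := hc _ hmem
          omega
      have hinv : ∀ (v : Int) (k : Nat × Nat), k ∈ (cells.insert (i, j) v).keys →
          k = (i, j) ∨ k ∈ cells.keys := by
        intro v k hk
        exact (PySem.Dict.mem_keys_insert _ _ _ _).1 hk
      split
      · rw [ih _ _ _ _ _ (by
          intro k hk
          rcases hinv _ _ hk with rfl | h1
          · dsimp only; omega
          · have := hc _ h1; omega)]
        rw [PySem.Dict.items_insert_of_not_contains cells _ hfresh]
        simp
      · rw [ih _ _ _ _ _ (by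
          intro k hk
          rcases hinv _ _ hk with rfl | h1
          · dsimp only; omega
          · have := hc _ h1; omega)]
        rw [PySem.Dict.items_insert_of_not_contains cells _ hfresh]
        simp
    · rw [if_neg h, if_neg h]; simp

theorem setCell_length (sol : List (List Int)) (a b : Nat) (v : Int) :
    (setCell sol a b v).length = sol.length := by
  simp [setCell]

theorem setCell_row_length (sol : List (List Int)) (a b : Nat) (v : Int) (r : Nat) :
    ((setCell sol a b v).getD r []).length = (sol.getD r []).length := by
  unfold setCell
  by_cases hr : r < sol.length
  · by_cases he : a = r
    · subst he
      rw [List.getD_eq_getElem _ _ (by simpa using hr), List.getElem_set_self (by simpa using hr),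
        List.length_set, List.getD_eq_getElem _ _ hr]
    · rw [List.getD_eq_getElem _ _ (by simpa using hr), List.getElem_set_ne (by omega),
        List.getD_eq_getElem _ _ hr]
  · rw [List.getD_eq_default _ _ (by simpa using Nat.le_of_not_lt hr),
      List.getD_eq_default _ _ (Nat.le_of_not_lt hr)]

theorem cellGet_setCell (sol : List (List Int)) (a b : Nat) (v : Int)
    (ha : a < sol.length) (hb : b < (sol.getD a []).length) (x y : Nat) :
    cellGet (setCell sol a b v) x y = if a = x ∧ b = y then v else cellGet sol x y := by
  unfold cellGet setCell
  by_cases hx : a = x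
  · subst hx
    have hrow : (sol.set a ((sol.getD a []).set b v)).getD a [] = (sol.getD a []).set b v := by
      rw [List.getD_eq_getElem _ _ (by simpa using ha)]
      exact List.getElem_set_self (by simpa using ha)
    rw [hrow]
    by_cases hy : b = y
    · subst hy
      rw [if_pos ⟨rfl, rfl⟩, List.getD_eq_getElem _ _ (by simpa using hb),
        List.getElem_set_self (by simpa using hb)]
    · rw [if_neg (by tauto)]
      by_cases hyr : y < (sol.getD a []).length
      · rw [List.getD_eq_getElem _ _ (by simpa using hyr), List.getElem_set_ne (by omega),
          List.getD_eq_getElem _ _ hyr]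
      · rw [List.getD_eq_default _ _ (by simpa using Nat.le_of_not_lt hyr),
          List.getD_eq_default _ _ (Nat.le_of_not_lt hyr)]
  · rw [if_neg (by tauto)]
    congr 1
    by_cases hxr : x < sol.length
    · rw [List.getD_eq_getElem _ _ (by simpa using hxr), List.getElem_set_ne (by omega),
        List.getD_eq_getElem _ _ hxr]
    · rw [List.getD_eq_default _ _ (by simpa using Nat.le_of_not_lt hxr),
        List.getD_eq_default _ _ (Nat.le_of_not_lt hxr)]

theorem applyCells_length (sol : List (List Int)) (ws : List ((Nat × Nat) × Int)) :
    (applyCells sol ws).length = sol.length := by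
  induction ws generalizing sol with
  | nil => rfl
  | cons p rest ih =>
    simp only [applyCells, List.foldl_cons] at ih ⊢
    rw [ih, setCell_length]

theorem applyCells_row_length (sol : List (List Int)) (ws : List ((Nat × Nat) × Int)) (r : Nat) :
    ((applyCells sol ws).getD r []).length = (sol.getD r []).length := by
  induction ws generalizing sol with
  | nil => rfl
  | cons p rest ih =>
    simp only [applyCells, List.foldl_cons] at ih ⊢
    rw [ih, setCell_row_length]

-- pointwise value of applyCells: the (unique) matching cell of ws, else the old entry
theorem applyCells_cellGet (ws : List ((Nat × Nat) × Int)) (sol : List (List Int))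
    (hnd : ws.Pairwise (fun a b => a.1 ≠ b.1))
    (hb : ∀ p ∈ ws, p.1.1 < sol.length ∧ p.1.2 < (sol.getD p.1.1 []).length)
    (x y : Nat) :
    cellGet (applyCells sol ws) x y
      = ((PySem.Dict.mk ws).get? (x, y)).getD (cellGet sol x y) := by
  induction ws generalizing sol with
  | nil => simp [applyCells, cellGet, PySem.Dict.get?]
  | cons p rest ih =>
    have hb0 := hb p (List.mem_cons_self ..)
    simp only [applyCells, List.foldl_cons] at ih ⊢
    rw [ih (setCell sol p.1.1 p.1.2 p.2) (List.Pairwise.of_cons hnd)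
      (by
        intro q hq
        have hq2 := hb q (List.mem_cons_of_mem _ hq)
        refine ⟨by rw [setCell_length]; exact hq2.1, ?_⟩
        rw [setCell_row_length]; exact hq2.2)]
    rw [PySem.Dict.get?_mk_cons]
    have hcell := cellGet_setCell sol p.1.1 p.1.2 p.2 hb0.1 hb0.2 x y
    by_cases hk : p.1 = (x, y)
    · have hb1 : (p.1 == (x, y)) = true := by simp [hk]
      rw [hb1, if_pos rfl]
      have hnot : (PySem.Dict.mk rest).get? (x, y) = none := by
        rw [PySem.Dict.get?_eq_none_iff_not_mem_keys]
        intro hmem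
        rcases List.mem_map.1 hmem with ⟨q, hq, hqk⟩
        exact (List.pairwise_cons.1 hnd).1 q hq (by rw [hk, hqk])
      rw [hnot, Option.getD_none, Option.getD_some, hcell,
        if_pos ⟨congrArg Prod.fst hk, congrArg Prod.snd hk⟩]
    · have hb1 : (p.1 == (x, y)) = false := by simpa using hk
      rw [hb1]
      simp only [Bool.false_eq_true, if_false]
      congr 1
      rw [hcell, if_neg (by
        intro hxy
        exact hk (Prod.ext hxy.1 hxy.2))]

-- ===== VERDICT (by name: the statement is the Claim_ definition above) =====
theorem restoreMatrix_spec : Claim_equal_restoreMatrix := by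
  intro rowSum colSum _
  unfold Spec_restoreMatrix restoreMatrix restoreMatrix_alt
  dsimp only
  set m := rowSum.length with hm
  set n := colSum.length with hn
  set sol0 := (List.range m).map (fun _ => (List.range n).map (fun _ => (0 : Int))) with hsol0
  set ws := walk m n (m + n + 1) rowSum colSum 0 0 with hws
  have hsl : sol0.length = m := by simp [hsol0]
  have hrowl : ∀ r : Nat, r < m → (sol0.getD r []).length = n := by
    intro r hr
    rw [List.getD_eq_getElem _ _ (by simpa [hsl] using hr)]
    simp [hsol0]
  have hA : (fillA m n (m + n + 1) sol0 rowSum colSum 0 0).1 = applyCells sol0 ws := by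
    have h0 := fillA_eq_applyCells m n (m + n + 1) sol0 rowSum colSum 0 0 (Nat.zero_le _) (Nat.zero_le _)
    rw [h0]
  have hB : loopB m n (m + n + 1) rowSum colSum 0 0 PySem.Dict.empty = PySem.Dict.mk ws := by
    have h1 := loopB_eq_walk m n (m + n + 1) rowSum colSum 0 0 PySem.Dict.empty
      (by intro k hk; simp [PySem.Dict.empty, PySem.Dict.keys] at hk)
    apply PySem.Dict.ext
    rw [h1]
    simp only [PySem.Dict.empty, List.nil_append]
    exact hws.symm
  have hmem := walk_mem m n (m + n + 1) rowSum colSum 0 0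
  have hnd := walk_pairwise m n (m + n + 1) rowSum colSum 0 0
  have hcell := applyCells_cellGet ws sol0 hnd
    (by
      intro p hp
      have := hmem p hp
      exact ⟨by omega, by rw [hrowl p.1.1 (by omega)]; omega⟩)
  rw [hA, hB]
  have hlen : (applyCells sol0 ws).length = m := by rw [applyCells_length, hsl]
  apply List.ext_getElem
  · simp [hlen]
  intro x hx1 hx2
  have hxm : x < m := by simpa [hlen] using hx1
  have hrl : ((applyCells sol0 ws).getD x []).length = n := by
    rw [applyCells_row_length, hrowl x hxm]
  have hgx : (applyCells sol0 ws)[x] = (applyCells sol0 ws).getD x [] :=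
    (List.getD_eq_getElem _ _ hx1).symm
  apply List.ext_getElem
  · rw [hgx, hrl, List.getElem_map, List.length_map, List.length_range]
  intro y hy1 hy2
  have hyn : y < n := by rw [hgx, hrl] at hy1; exact hy1
  have hgy : ((applyCells sol0 ws).getD x [])[y]'(by rw [hrl]; exact hyn)
      = ((applyCells sol0 ws).getD x []).getD y 0 :=
    (List.getD_eq_getElem _ _ (by rw [hrl]; exact hyn)).symm
  have hz : (sol0.getD x []).getD y 0 = 0 := by
    have h1 : sol0.getD x [] = List.map (fun _ => (0 : Int)) (List.range n) := by
      rw [List.getD_eq_getElem _ _ (by rw [hsl]; exact hxm)]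
      simp [hsol0]
    rw [h1, List.getD_eq_getElem _ _ (by simpa using hyn)]
    simp
  simp only [List.getElem_map, List.getElem_range]
  have h2 : y < ((applyCells sol0 ws).getD x []).length := by rw [hrl]; exact hyn
  have hc2 := hcell x y
  unfold cellGet at hc2
  have e1 : (applyCells sol0 ws)[x][y]'hy1 = ((applyCells sol0 ws).getD x []).getD y 0 := by
    calc (applyCells sol0 ws)[x][y]'hy1
        = ((applyCells sol0 ws)[x][y]?).getD 0 := by rw [List.getElem?_eq_getElem hy1]; rfl
      _ = (((applyCells sol0 ws).getD x [])[y]?).getD 0 := by rw [hgx]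
      _ = ((applyCells sol0 ws).getD x []).getD y 0 := by rw [List.getElem?_eq_getElem h2]; exact ((List.getD_eq_getElem _ _ h2).symm)
  rw [e1, hc2, hz, PySem.Dict.getD_eq_get?_getD]
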